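-- pv_equiv track=rewrite | github.com/indifferentketchup/stackctl | backend/flow_nodes/runner.py | _next_target
-- ===== SOURCE A (Python) =====
-- from typing import Any
--
-- def _next_target(edges: list[dict[str, Any]], from_id: str, cond_result: bool | None) -> str | None:
--     outs = [e for e in edges if str(e.get("source")) == from_id]
--     if not outs:
--         return None
--     if len(outs) == 1:
--         return str(outs[0].get("target"))
--     want = "true" if cond_result else "false"
--     for e in outs:
--         h = str(e.get("sourceHandle") or "").lower()
--         if h == want:
--             return str(e.get("target"))
--     return str(outs[0].get("target"))
-- ===== SOURCE B (Python) =====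
-- def _next_target(edges, from_id, cond_result):
--     want = "true" if cond_result else "false"
--     first = None
--     matched = None
--     for e in edges:
--         if str(e.get("source")) == from_id:
--             t = str(e.get("target"))
--             if first is None:
--                 first = t
--             if matched is None and str(e.get("sourceHandle") or "").lower() == want:
--                 matched = t
--     if first is None:
--         return None
--     return matched if matched is not None else first
-- ===== Notes on version B (the rewrite author's own statement) =====
-- stated objective: simpler
-- what changed: Replaces the filter-then-rescan (build outs, len==1 special case, then a second loop over outs) with a single pass over edges tracking two candidates (first source-edge target and first handle-matching target); the len==1 branch is provably redundant and disappears.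
import Mathlib
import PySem

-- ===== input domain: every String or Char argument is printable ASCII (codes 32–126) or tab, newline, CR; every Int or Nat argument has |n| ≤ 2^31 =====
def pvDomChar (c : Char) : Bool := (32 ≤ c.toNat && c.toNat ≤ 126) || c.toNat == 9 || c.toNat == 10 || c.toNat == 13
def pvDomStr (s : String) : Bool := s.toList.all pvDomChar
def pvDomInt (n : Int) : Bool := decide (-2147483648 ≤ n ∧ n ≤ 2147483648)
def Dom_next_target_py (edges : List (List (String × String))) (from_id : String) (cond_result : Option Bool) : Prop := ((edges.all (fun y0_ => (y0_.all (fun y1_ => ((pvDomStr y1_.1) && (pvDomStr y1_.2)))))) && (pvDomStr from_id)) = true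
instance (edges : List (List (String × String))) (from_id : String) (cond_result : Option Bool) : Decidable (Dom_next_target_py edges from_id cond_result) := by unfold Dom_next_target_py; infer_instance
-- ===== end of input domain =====

-- B replaces A's filter-then-rescan (with a redundant len==1 branch) by one pass over
-- `edges` tracking two candidates; objective: simpler.

-- ===== PORT A =====
-- str(e.get(k)): a missing key prints as "None" (dict = assoc list, first match)
def pvGetStr (e : List (String × String)) (k : String) : String :=
  match e.lookup k with
  | some v => v
  | none => "None"

-- str(e.get("sourceHandle") or "").lower(): None and "" both normalize to ""
def pvHandle (e : List (String × String)) : String :=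
  PySem.Str.lower ((e.lookup "sourceHandle").getD "")

def next_target_py (edges : List (List (String × String))) (from_id : String) (cond_result : Option Bool) : Option String :=
  match edges.filter (fun e => pvGetStr e "source" == from_id) with
  | [] => none
  | e0 :: rest =>
    if rest.isEmpty then some (pvGetStr e0 "target")
    else
      match (e0 :: rest).find?
          (fun e => pvHandle e == (if cond_result.getD false then "true" else "false")) with
      | some e => some (pvGetStr e "target")
      | none => some (pvGetStr e0 "target")

-- ===== PORT B =====
-- one fold step: state = (first source-edge target, first handle-matching target)
def pvAltStep (from_id want : String) (st : Option String × Option String)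
    (e : List (String × String)) : Option String × Option String :=
  if pvGetStr e "source" == from_id then
    let t := pvGetStr e "target"
    ((if st.1.isNone then some t else st.1),
     (if st.2.isNone && (pvHandle e == want) then some t else st.2))
  else st

def next_target_py_alt (edges : List (List (String × String))) (from_id : String) (cond_result : Option Bool) : Option String :=
  match edges.foldl
      (pvAltStep from_id (if cond_result.getD false then "true" else "false")) (none, none) with
  | (none, _) => none
  | (some _, some m) => some m
  | (some f, none) => some f

-- ===== PRECONDITION & SPEC =====
def Spec_next_target_py (edges : List (List (String × String))) (from_id : String) (cond_result : Option Bool) (out : Option String) : Prop := out = next_target_py_alt edges from_id cond_result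
instance (edges : List (List (String × String))) (from_id : String) (cond_result : Option Bool) (out : Option String) : Decidable (Spec_next_target_py edges from_id cond_result out) := by unfold Spec_next_target_py; infer_instance

-- ===== CLAIM (what is proved, stated in full; the proofs are below) =====
def Claim_equal_next_target_py : Prop := ∀ (edges : List (List (String × String))) (from_id : String) (cond_result : Option Bool), Dom_next_target_py edges from_id cond_result → Spec_next_target_py edges from_id cond_result (next_target_py edges from_id cond_result)

-- ===== LEMMAS AND PROOFS =====

-- once both candidates are set, the step is the identity
theorem pvAltStep_stable (from_id want : String) (f m : String)
    (l : List (List (String × String))) :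
    l.foldl (pvAltStep from_id want) (some f, some m) = (some f, some m) := by
  induction l with
  | nil => rfl
  | cons e l ih =>
    simp only [List.foldl_cons, pvAltStep]
    split <;> simp [ih]

-- with the first candidate fixed and no match yet, the fold computes find? on the filtered list
theorem pvAltStep_found (from_id want : String) (f : String)
    (l : List (List (String × String))) :
    l.foldl (pvAltStep from_id want) (some f, none) =
      (some f,
        ((l.filter (fun e => pvGetStr e "source" == from_id)).find?
            (fun e => pvHandle e == want)).map (fun e => pvGetStr e "target")) := by
  induction l with
  | nil => rfl
  | cons e l ih =>
    simp only [List.foldl_cons, pvAltStep, List.filter_cons]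
    by_cases hs : (pvGetStr e "source" == from_id) = true
    · simp only [hs, if_pos, Option.isNone_none, Option.isNone_some, Bool.true_and]
      by_cases hq : (pvHandle e == want) = true
      · simp [hq, pvAltStep_stable, List.find?_cons]
      · simp only [Bool.not_eq_true] at hq
        simp [hq, ih, List.find?_cons]
    · simp only [Bool.not_eq_true] at hs
      simp [hs, ih]

-- B's whole fold, characterized by the filtered list and find?
theorem pvAltFold_char (from_id want : String) (edges : List (List (String × String))) :
    edges.foldl (pvAltStep from_id want) (none, none) =
      match edges.filter (fun e => pvGetStr e "source" == from_id) with
      | [] => (none, none)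
      | e0 :: rest =>
        (some (pvGetStr e0 "target"),
          ((e0 :: rest).find? (fun e => pvHandle e == want)).map (fun e => pvGetStr e "target")) := by
  induction edges with
  | nil => rfl
  | cons e l ih =>
    simp only [List.foldl_cons, List.filter_cons]
    by_cases hs : (pvGetStr e "source" == from_id) = true
    · simp only [hs, if_pos]
      simp only [pvAltStep, hs, if_pos, Option.isNone_none, Bool.true_and]
      by_cases hq : (pvHandle e == want) = true
      · simp [hq, pvAltStep_stable, List.find?_cons]
      · simp only [Bool.not_eq_true] at hq
        simp [hq, pvAltStep_found, List.find?_cons]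
    · simp only [Bool.not_eq_true] at hs
      simp only [hs, Bool.false_eq_true, if_false]
      have : pvAltStep from_id want (none, none) e = (none, none) := by
        simp [pvAltStep, hs]
      rw [this, ih]

theorem next_target_py_spec : Claim_equal_next_target_py := by
  intro edges from_id cond_result _
  unfold Spec_next_target_py next_target_py next_target_py_alt
  rw [pvAltFold_char]
  cases houts : edges.filter (fun e => pvGetStr e "source" == from_id) with
  | nil => rfl
  | cons e0 rest =>
    cases rest with
    | nil =>
      simp only [List.isEmpty_nil, if_pos]
      cases hf : [e0].find? (fun e => pvHandle e == (if cond_result.getD false then "true" else "false")) with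
      | none => simp
      | some e =>
        have : e = e0 := by
          have hm := List.mem_of_find?_eq_some hf
          simpa using hm
        simp [this]
    | cons e1 rest' =>
      simp only [List.isEmpty_cons, Bool.false_eq_true, if_false]
      cases hf : (e0 :: e1 :: rest').find? (fun e => pvHandle e == (if cond_result.getD false then "true" else "false")) with
      | none => simp
      | some e => simp
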